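-- pv_equiv track=rewrite | github.com/Shunsuke-Sasaki/AI_GA | A_49_Lamarck_roulet.py | climbing
-- ===== SOURCE A (Python) =====
-- import copy
--
-- def adapt_score(ind,env):
--     X=[0 for _ in range(20)]
--     score=0
--     for i in range(len(env)):
--         if ind[i]==1:
--             X[env[i][0]]+=1
--             X[env[i][1]]+=1
--             X[env[i][2]]+=1
--         else:
--             X[env[i][0]]-=1
--             X[env[i][1]]-=1
--             X[env[i][2]]-=1
--         for i in range(len(X)):
--             if(X[i]==0):
--                 score+=1
--     return score
--
-- def climbing(ind,env):
--     near_ind = copy.deepcopy(ind)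
--     while(1):
--         score = adapt_score(near_ind,env)
--         for i in range(len(ind)):
--             near_ind[i]=1-near_ind[i]
--             if(adapt_score(near_ind,env)>score):
--                 break
--             else:
--                 near_ind[i]=1-near_ind[i]
--         return near_ind
-- ===== SOURCE B (Python) =====
-- def climbing(ind, env):
--     n = len(env)
--     # prefix states: states[t] = X after processing entries 0..t
--     X = [0] * 20
--     states = []
--     for t in range(n):
--         s = 1 if ind[t] == 1 else -1
--         a, b, c = env[t]
--         X[a] += s
--         X[b] += s
--         X[c] += s
--         states.append(X.copy())
--     # suffix value-count tables, built backwards; deltas[i] = score change of flipping bit i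
--     suff = [dict() for _ in range(20)]
--     deltas = [0] * n
--     for i in range(n - 1, -1, -1):
--         for cell in range(20):
--             v = states[i][cell]
--             suff[cell][v] = suff[cell].get(v, 0) + 1
--         old = 1 if ind[i] == 1 else -1
--         new = 1 if 1 - ind[i] == 1 else -1
--         d = [0] * 20
--         a, b, c = env[i]
--         d[a] += new - old
--         d[b] += new - old
--         d[c] += new - old
--         delta = 0
--         for cell in range(20):
--             if d[cell] != 0:
--                 delta += suff[cell].get(-d[cell], 0) - suff[cell].get(0, 0)
--         deltas[i] = delta
--     out = list(ind)
--     for i in range(len(ind)):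
--         if i < n and deltas[i] > 0:
--             out[i] = 1 - out[i]
--             return out
--     return out
-- ===== Notes on version B (the rewrite author's own statement) =====
-- stated objective: faster
-- what changed: A re-runs the full adapt_score scan for every candidate flip (O(len(env)) work per flip); B computes the prefix X-states once, builds per-cell suffix value-count tables backwards, reads off every flip's score delta from the tables in O(1), and flips the first index with a positive delta.
import Mathlib
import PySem

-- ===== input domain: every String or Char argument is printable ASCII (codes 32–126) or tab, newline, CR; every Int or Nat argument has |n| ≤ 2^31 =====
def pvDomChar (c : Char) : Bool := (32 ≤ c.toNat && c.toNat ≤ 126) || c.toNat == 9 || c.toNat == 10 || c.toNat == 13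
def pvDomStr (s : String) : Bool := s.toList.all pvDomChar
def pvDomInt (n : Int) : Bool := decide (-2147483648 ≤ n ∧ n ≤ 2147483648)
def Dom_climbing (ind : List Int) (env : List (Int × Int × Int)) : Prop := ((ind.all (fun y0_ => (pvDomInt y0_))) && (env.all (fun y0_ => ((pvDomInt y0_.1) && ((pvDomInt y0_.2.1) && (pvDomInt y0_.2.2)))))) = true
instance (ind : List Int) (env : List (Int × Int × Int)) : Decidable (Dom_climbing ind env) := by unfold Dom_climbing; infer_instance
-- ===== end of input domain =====

-- B replaces A's per-flip full re-scoring (O(N^2) adapt_score calls) by one prefix-state pass plus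
-- per-cell suffix value-count tables, computing every flip's score delta in O(1) table lookups.

-- ===== PORT A =====
-- helper adapt_score of A, transliterated
def adaptScore (ind : List Int) (env : List (Int × Int × Int)) : Int :=
  ((PySem.List.pyRange 0 (PySem.List.len env) 1).foldl (fun (st : List Int × Int) i =>
    let X := st.1
    let e := PySem.List.pyGetD env i ((0:Int), (0:Int), (0:Int))
    let X :=
      if PySem.List.pyGetD ind i 0 == 1 then
        let X1 := PySem.List.pySetD X e.1 (PySem.List.pyGetD X e.1 0 + 1)
        let X2 := PySem.List.pySetD X1 e.2.1 (PySem.List.pyGetD X1 e.2.1 0 + 1)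
        PySem.List.pySetD X2 e.2.2 (PySem.List.pyGetD X2 e.2.2 0 + 1)
      else
        let X1 := PySem.List.pySetD X e.1 (PySem.List.pyGetD X e.1 0 - 1)
        let X2 := PySem.List.pySetD X1 e.2.1 (PySem.List.pyGetD X1 e.2.1 0 - 1)
        PySem.List.pySetD X2 e.2.2 (PySem.List.pyGetD X2 e.2.2 0 - 1)
    let score := (PySem.List.pyRange 0 (PySem.List.len X) 1).foldl
      (fun sc j => if PySem.List.pyGetD X j 0 == 0 then sc + 1 else sc) st.2
    (X, score)) ((List.replicate 20 (0:Int)), (0:Int))).2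

-- A's 'for i in range(len(ind))' with break: recursion over the index list; an unsuccessful
-- flip is flipped back (1-(1-x)=x), i.e. the old near is kept
def climbLoopA (env : List (Int × Int × Int)) (score : Int) (near : List Int) : List Int → List Int
  | [] => near
  | i :: rest =>
    let near' := PySem.List.pySetD near i (1 - PySem.List.pyGetD near i 0)
    if adaptScore near' env > score then near'
    else climbLoopA env score near rest

def climbing (ind : List Int) (env : List (Int × Int × Int)) : List Int :=
  let near := ind
  let score := adaptScore near env
  climbLoopA env score near (PySem.List.pyRange 0 (PySem.List.len ind) 1)

-- ===== PORT B =====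
-- first loop of Source B: prefix states, states[t] = X after entries 0..t
def bStates (ind : List Int) (env : List (Int × Int × Int)) : List (List Int) :=
  ((PySem.List.pyRange 0 (PySem.List.len env) 1).foldl (fun (st : List Int × List (List Int)) t =>
    let s : Int := if PySem.List.pyGetD ind t 0 == 1 then 1 else -1
    let e := PySem.List.pyGetD env t ((0:Int), (0:Int), (0:Int))
    let X := st.1
    let X1 := PySem.List.pySetD X e.1 (PySem.List.pyGetD X e.1 0 + s)
    let X2 := PySem.List.pySetD X1 e.2.1 (PySem.List.pyGetD X1 e.2.1 0 + s)
    let X3 := PySem.List.pySetD X2 e.2.2 (PySem.List.pyGetD X2 e.2.2 0 + s)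
    (X3, st.2 ++ [X3])) ((List.replicate 20 (0:Int)), ([] : List (List Int)))).2

-- second loop of Source B: backwards over i, maintaining the 20 suffix value-count dicts
def bDeltas (ind : List Int) (env : List (Int × Int × Int)) (states : List (List Int)) : List Int :=
  ((PySem.List.pyRange (PySem.List.len env - 1) (-1) (-1)).foldl
    (fun (st : List (PySem.Dict Int Int) × List Int) i =>
      let suff := (PySem.List.pyRange 0 20 1).foldl (fun suff cell =>
        let v := PySem.List.pyGetD (PySem.List.pyGetD states i []) cell 0
        let dct := PySem.List.pyGetD suff cell PySem.Dict.empty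
        PySem.List.pySetD suff cell (dct.insert v (dct.getD v 0 + 1))) st.1
      let old : Int := if PySem.List.pyGetD ind i 0 == 1 then 1 else -1
      let nw : Int := if 1 - PySem.List.pyGetD ind i 0 == 1 then 1 else -1
      let e := PySem.List.pyGetD env i ((0:Int), (0:Int), (0:Int))
      let d0 := List.replicate 20 (0:Int)
      let d1 := PySem.List.pySetD d0 e.1 (PySem.List.pyGetD d0 e.1 0 + (nw - old))
      let d2 := PySem.List.pySetD d1 e.2.1 (PySem.List.pyGetD d1 e.2.1 0 + (nw - old))
      let d := PySem.List.pySetD d2 e.2.2 (PySem.List.pyGetD d2 e.2.2 0 + (nw - old))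
      let delta := (PySem.List.pyRange 0 20 1).foldl (fun delta cell =>
        if PySem.List.pyGetD d cell 0 ≠ 0 then
          delta + ((PySem.List.pyGetD suff cell PySem.Dict.empty).getD (-(PySem.List.pyGetD d cell 0)) 0
                   - (PySem.List.pyGetD suff cell PySem.Dict.empty).getD 0 0)
        else delta) 0
      (suff, PySem.List.pySetD st.2 i delta))
    ((List.replicate 20 (PySem.Dict.empty : PySem.Dict Int Int)), List.replicate (PySem.List.len env).toNat (0:Int))).2

-- last loop of Source B: first i with i < n and deltas[i] > 0 gets flipped, early return
def pickLoopB (n : Int) (deltas : List Int) (out : List Int) : List Int → List Int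
  | [] => out
  | i :: rest =>
    if i < n ∧ PySem.List.pyGetD deltas i 0 > 0 then
      PySem.List.pySetD out i (1 - PySem.List.pyGetD out i 0)
    else pickLoopB n deltas out rest

def climbing_alt (ind : List Int) (env : List (Int × Int × Int)) : List Int :=
  let states := bStates ind env
  let deltas := bDeltas ind env states
  pickLoopB (PySem.List.len env) deltas ind (PySem.List.pyRange 0 (PySem.List.len ind) 1)

-- ===== PRECONDITION & SPEC =====
-- Pre_ excludes exactly the inputs where A raises an IndexError: adapt_score reads ind[i] for
-- every i < len(env) (needs len(env) ≤ len(ind)) and indexes the 20-cell list X with each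
-- coordinate of env (needs every coordinate in [-20, 20); negative ones index from the end).
def Pre_climbing (ind : List Int) (env : List (Int × Int × Int)) : Prop :=
  env.length ≤ ind.length ∧
  ∀ e ∈ env, (-20 ≤ e.1 ∧ e.1 < 20) ∧ (-20 ≤ e.2.1 ∧ e.2.1 < 20) ∧ (-20 ≤ e.2.2 ∧ e.2.2 < 20)
instance (ind : List Int) (env : List (Int × Int × Int)) : Decidable (Pre_climbing ind env) := by
  unfold Pre_climbing; infer_instance

def pvWitness_climbing : List Int × (List (Int × Int × Int)) :=
  ([1, 0, 1], [(0, 1, 2), (-1, 5, 5)])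

def Spec_climbing (ind : List Int) (env : List (Int × Int × Int)) (out : List Int) : Prop := out = climbing_alt ind env
instance (ind : List Int) (env : List (Int × Int × Int)) (out : List Int) : Decidable (Spec_climbing ind env out) := by unfold Spec_climbing; infer_instance

-- ===== CLAIM (what is proved, stated in full; the proofs are below) =====
def Claim_equal_climbing : Prop := ∀ (ind : List Int) (env : List (Int × Int × Int)), Dom_climbing ind env → Pre_climbing ind env → Spec_climbing ind env (climbing ind env)

-- ===== LEMMAS AND PROOFS =====
-- ---------- proof-side abstractions ----------
def pvIdx (c : Int) : Nat := (c % 20).toNat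
def pvInE (e : Int × Int × Int) : Prop :=
  (-20 ≤ e.1 ∧ e.1 < 20) ∧ (-20 ≤ e.2.1 ∧ e.2.1 < 20) ∧ (-20 ≤ e.2.2 ∧ e.2.2 < 20)
def pvSgn (x : Int) : Int := if x == 1 then 1 else -1
def pvCnt (e : Int × Int × Int) (k : Nat) : Int :=
  (if pvIdx e.1 = k then 1 else 0) + (if pvIdx e.2.1 = k then 1 else 0) + (if pvIdx e.2.2 = k then 1 else 0)
def pvBump (X : List Int) (e : Int × Int × Int) (s : Int) : List Int :=
  let X1 := PySem.List.pySetD X e.1 (PySem.List.pyGetD X e.1 0 + s)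
  let X2 := PySem.List.pySetD X1 e.2.1 (PySem.List.pyGetD X1 e.2.1 0 + s)
  PySem.List.pySetD X2 e.2.2 (PySem.List.pyGetD X2 e.2.2 0 + s)
def pvXp (ind : List Int) (env : List (Int × Int × Int)) (m k : Nat) : Int :=
  ∑ j ∈ Finset.range m, pvSgn (ind.getD j 0) * pvCnt (env.getD j (0,0,0)) k
def pvXL (ind : List Int) (env : List (Int × Int × Int)) (m : Nat) : List Int :=
  (List.range 20).map (fun k => pvXp ind env m k)
def pvZ (ind : List Int) (env : List (Int × Int × Int)) (m : Nat) : Int :=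
  ∑ k ∈ Finset.range 20, if pvXp ind env m k = 0 then (1:Int) else 0
def pvScore (ind : List Int) (env : List (Int × Int × Int)) (m : Nat) : Int :=
  ∑ t ∈ Finset.range m, pvZ ind env (t+1)
def pvDif (ind : List Int) (env : List (Int × Int × Int)) (i k : Nat) : Int :=
  (pvSgn (1 - ind.getD i 0) - pvSgn (ind.getD i 0)) * pvCnt (env.getD i (0,0,0)) k
def pvSC (ind : List Int) (env : List (Int × Int × Int)) (i k : Nat) (v : Int) : Int :=
  ∑ t ∈ Finset.Ico i env.length, if pvXp ind env (t+1) k = v then (1:Int) else 0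
def pvDelta (ind : List Int) (env : List (Int × Int × Int)) (i : Nat) : Int :=
  ∑ k ∈ Finset.range 20, if pvDif ind env i k ≠ 0
    then pvSC ind env i k (-(pvDif ind env i k)) - pvSC ind env i k 0 else 0

-- ---------- basic index lemmas ----------


theorem pvGetD_eq {α : Type} (l : List α) (n : Nat) (d : α) (h : n < l.length) : l.getD n d = l[n] := by
  simp [List.getD_eq_getElem?_getD, List.getElem?_eq_getElem h]

theorem pvGetD_idx (X : List Int) (c d : Int) (hX : X.length = 20)
    (h1 : -20 ≤ c) (h2 : c < 20) :
    PySem.List.pyGetD X c d = X.getD (pvIdx c) d := by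
  have hidx : pvIdx c < 20 := by unfold pvIdx; omega
  by_cases hc : 0 ≤ c
  · rw [PySem.List.pyGetD_eq_getElem X d hc (by rw [hX]; exact_mod_cast h2),
        pvGetD_eq X (pvIdx c) d (by omega)]
    congr 1
    unfold pvIdx; omega
  · unfold PySem.List.pyGetD PySem.List.pyGet? PySem.List.pyIdx?
    rw [if_neg (by omega), if_pos (by omega : -(X.length : Int) ≤ c)]
    have hn : X.length - (-c).toNat = pvIdx c := by unfold pvIdx; omega
    simp [hn, List.getD_eq_getElem?_getD]

theorem pvSetD_idx (X : List Int) (c v : Int) (hX : X.length = 20)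
    (h1 : -20 ≤ c) (h2 : c < 20) :
    PySem.List.pySetD X c v = X.set (pvIdx c) v := by
  unfold PySem.List.pySetD PySem.List.pySet? PySem.List.pyIdx? pvIdx
  by_cases hc : 0 ≤ c
  · rw [if_pos hc, if_pos (by omega : c < (X.length : Int))]
    simp only [Option.map_some, Option.getD_some]
    congr 1; omega
  · rw [if_neg (by omega), if_pos (by omega : -(X.length : Int) ≤ c)]
    simp only [Option.map_some, Option.getD_some]
    congr 1; omega

theorem getD_set_add (X : List Int) (a : Nat) (s : Int) (hX : X.length = 20) (ha : a < 20)
    (k : Nat) (hk : k < 20) :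
    (X.set a (X.getD a 0 + s)).getD k 0 = X.getD k 0 + s * (if a = k then 1 else 0) := by
  rw [pvGetD_eq _ k 0 (by simp [hX]; omega), List.getElem_set]
  by_cases h : a = k
  · subst h
    rw [if_pos rfl, if_pos rfl]
    ring
  · rw [if_neg h, if_neg h, pvGetD_eq X k 0 (by omega)]
    ring


theorem pvBump_length (X : List Int) (e : Int × Int × Int) (s : Int)
    (hX : X.length = 20) : (pvBump X e s).length = 20 := by
  simp [pvBump, PySem.List.length_pySetD, hX]

theorem pvBump_getD (X : List Int) (e : Int × Int × Int) (s : Int)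
    (hX : X.length = 20) (he : pvInE e) (k : Nat) (hk : k < 20) :
    (pvBump X e s).getD k 0 = X.getD k 0 + s * pvCnt e k := by
  obtain ⟨⟨h1a, h1b⟩, ⟨h2a, h2b⟩, ⟨h3a, h3b⟩⟩ := he
  have i1 : pvIdx e.1 < 20 := by unfold pvIdx; omega
  have i2 : pvIdx e.2.1 < 20 := by unfold pvIdx; omega
  have i3 : pvIdx e.2.2 < 20 := by unfold pvIdx; omega
  simp only [pvBump]
  rw [pvSetD_idx X e.1 _ hX h1a h1b, pvGetD_idx X e.1 0 hX h1a h1b]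
  set X1 := X.set (pvIdx e.1) (X.getD (pvIdx e.1) 0 + s) with hX1
  have l1 : X1.length = 20 := by simp [hX1, hX]
  rw [pvSetD_idx X1 e.2.1 _ l1 h2a h2b, pvGetD_idx X1 e.2.1 0 l1 h2a h2b]
  set X2 := X1.set (pvIdx e.2.1) (X1.getD (pvIdx e.2.1) 0 + s) with hX2
  have l2 : X2.length = 20 := by simp [hX2, l1]
  rw [pvSetD_idx X2 e.2.2 _ l2 h3a h3b, pvGetD_idx X2 e.2.2 0 l2 h3a h3b]
  rw [getD_set_add X2 (pvIdx e.2.2) s l2 i3 k hk, hX2,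
      getD_set_add X1 (pvIdx e.2.1) s l1 i2 k hk, hX1,
      getD_set_add X (pvIdx e.1) s hX i1 k hk]
  unfold pvCnt
  ring

theorem countP_toSum (X : List Int) :
    ((X.countP (fun v => v == 0) : Nat) : Int)
      = ∑ k ∈ Finset.range X.length, (if X.getD k 0 = 0 then (1:Int) else 0) := by
  induction X with
  | nil => simp
  | cons x xs ih =>
    rw [List.countP_cons, List.length_cons, Finset.sum_range_succ']
    simp only [List.getD_cons_succ, List.getD_cons_zero]
    rw [← ih]
    by_cases hx : x = 0
    · simp [hx]
    · simp [hx]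

theorem countFold (X : List Int) (s0 : Int) :
    (PySem.List.pyRange 0 (PySem.List.len X) 1).foldl
      (fun sc j => if PySem.List.pyGetD X j 0 == 0 then sc + 1 else sc) s0
    = s0 + ∑ k ∈ Finset.range X.length, (if X.getD k 0 = 0 then (1:Int) else 0) := by
  rw [show PySem.List.len X = (X.length : Int) from PySem.List.len_eq X]
  rw [PySem.List.foldl_pyRange_zero_pyGetD' X 0 (fun sc v => if v == 0 then sc + 1 else sc) s0]
  rw [PySem.List.foldl_if_add_one (fun v => v == 0) X s0]
  rw [countP_toSum]

-- ---------- pvXL facts ----------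
theorem pvXL_length (ind : List Int) (env : List (Int × Int × Int)) (m : Nat) :
    (pvXL ind env m).length = 20 := by simp [pvXL]

theorem pvXL_getD (ind : List Int) (env : List (Int × Int × Int)) (m k : Nat) (hk : k < 20) :
    (pvXL ind env m).getD k 0 = pvXp ind env m k := by
  rw [pvGetD_eq _ k 0 (by simp [pvXL]; omega)]
  simp [pvXL]

theorem pvXL_succ (ind : List Int) (env : List (Int × Int × Int)) (m : Nat)
    (he : pvInE (env.getD m (0,0,0))) :
    pvXL ind env (m+1) = pvBump (pvXL ind env m) (env.getD m (0,0,0)) (pvSgn (ind.getD m 0)) := by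
  apply List.ext_getElem
  · rw [pvXL_length, pvBump_length _ _ _ (pvXL_length ind env m)]
  · intro k h1 h2
    have hk : k < 20 := by rw [pvXL_length] at h1; exact h1
    rw [← pvGetD_eq _ k 0 h1, ← pvGetD_eq _ k 0 h2,
        pvXL_getD ind env (m+1) k hk,
        pvBump_getD _ _ _ (pvXL_length ind env m) he k hk,
        pvXL_getD ind env m k hk]
    unfold pvXp
    rw [Finset.sum_range_succ]


-- ---------- A's adapt_score ----------
def A_step (ind : List Int) (env : List (Int × Int × Int)) : (List Int × Int) → Int → (List Int × Int) :=
  fun (st : List Int × Int) i =>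
    let X := st.1
    let e := PySem.List.pyGetD env i ((0:Int), (0:Int), (0:Int))
    let X :=
      if PySem.List.pyGetD ind i 0 == 1 then
        let X1 := PySem.List.pySetD X e.1 (PySem.List.pyGetD X e.1 0 + 1)
        let X2 := PySem.List.pySetD X1 e.2.1 (PySem.List.pyGetD X1 e.2.1 0 + 1)
        PySem.List.pySetD X2 e.2.2 (PySem.List.pyGetD X2 e.2.2 0 + 1)
      else
        let X1 := PySem.List.pySetD X e.1 (PySem.List.pyGetD X e.1 0 - 1)
        let X2 := PySem.List.pySetD X1 e.2.1 (PySem.List.pyGetD X1 e.2.1 0 - 1)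
        PySem.List.pySetD X2 e.2.2 (PySem.List.pyGetD X2 e.2.2 0 - 1)
    let score := (PySem.List.pyRange 0 (PySem.List.len X) 1).foldl
      (fun sc j => if PySem.List.pyGetD X j 0 == 0 then sc + 1 else sc) st.2
    (X, score)

theorem adaptScore_def (ind : List Int) (env : List (Int × Int × Int)) :
    adaptScore ind env
      = ((PySem.List.pyRange 0 (PySem.List.len env) 1).foldl (A_step ind env)
          ((List.replicate 20 (0:Int)), (0:Int))).2 := rfl

theorem pvZ_eq_sum_getD (ind : List Int) (env : List (Int × Int × Int)) (m : Nat) :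
    ∑ k ∈ Finset.range 20, (if (pvXL ind env m).getD k 0 = 0 then (1:Int) else 0)
      = pvZ ind env m := by
  unfold pvZ
  refine Finset.sum_congr rfl (fun k hk => ?_)
  rw [pvXL_getD ind env m k (Finset.mem_range.mp hk)]

theorem A_step'_def (ind : List Int) (env : List (Int × Int × Int)) :
    A_step ind env = fun (st : List Int × Int) i =>
      let e := PySem.List.pyGetD env i ((0:Int), (0:Int), (0:Int))
      let X := if PySem.List.pyGetD ind i 0 == 1 then pvBump st.1 e 1 else pvBump st.1 e (-1)
      (X, (PySem.List.pyRange 0 (PySem.List.len X) 1).foldl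
        (fun sc j => if PySem.List.pyGetD X j 0 == 0 then sc + 1 else sc) st.2) := rfl

theorem A_step_eq (ind : List Int) (env : List (Int × Int × Int)) (m : Nat)
    (he : pvInE (env.getD m (0,0,0))) (st : List Int × Int) (hst : st.1 = pvXL ind env m) :
    A_step ind env st (m : Int) = (pvXL ind env (m+1), st.2 + pvZ ind env (m+1)) := by
  rw [A_step'_def]
  simp only [PySem.List.pyGetD_natCast ind m 0, PySem.List.pyGetD_natCast env m]
  have hbump : (if (ind.getD m 0 == 1) = true then pvBump st.1 (env.getD m (0,0,0)) 1
      else pvBump st.1 (env.getD m (0,0,0)) (-1)) = pvXL ind env (m+1) := by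
    rw [hst, pvXL_succ ind env m he]
    unfold pvSgn
    by_cases hc : (ind.getD m 0 == 1) = true
    · rw [if_pos hc, if_pos hc]
    · rw [if_neg hc, if_neg hc]
  rw [hbump, countFold (pvXL ind env (m+1)) st.2, pvXL_length, pvZ_eq_sum_getD]

theorem Afold (ind : List Int) (env : List (Int × Int × Int))
    (henv : ∀ e ∈ env, pvInE e) (m : Nat) (hm : m ≤ env.length) :
    (PySem.List.pyRange 0 (m : Int) 1).foldl (A_step ind env)
        ((List.replicate 20 (0:Int)), (0:Int))
      = (pvXL ind env m, pvScore ind env m) := by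
  induction m with
  | zero =>
    rw [PySem.List.pyRange_one_eq_nil (by omega)]
    simp [pvXL, pvXp, pvScore, List.map_const']
  | succ m ih =>
    rw [show ((m + 1 : Nat) : Int) = (m : Int) + 1 by push_cast; ring,
        PySem.List.pyRange_one_succ_right (by omega : (0:Int) ≤ (m : Int)),
        List.foldl_append, ih (by omega)]
    have hmem : env.getD m (0,0,0) ∈ env := by
      rw [pvGetD_eq env m (0,0,0) (by omega)]
      exact List.getElem_mem _
    rw [List.foldl_cons, List.foldl_nil,
        A_step_eq ind env m (henv _ hmem) _ rfl]
    unfold pvScore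
    rw [Finset.sum_range_succ]

theorem adaptScore_eq (ind : List Int) (env : List (Int × Int × Int))
    (henv : ∀ e ∈ env, pvInE e) :
    adaptScore ind env = pvScore ind env env.length := by
  rw [adaptScore_def, PySem.List.len_eq, Afold ind env henv env.length (le_refl _)]

-- ---------- flipping one bit ----------
theorem getD_set' (l : List Int) (i j : Nat) (v : Int) (hi : i < l.length) :
    (l.set i v).getD j 0 = if j = i then v else l.getD j 0 := by
  by_cases h : j = i
  · subst h
    simp [List.getD_eq_getElem?_getD, List.getElem?_set, hi]
  · have h' : i ≠ j := fun hh => h hh.symm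
    simp [List.getD_eq_getElem?_getD, h']
    exact fun hh => absurd hh h

theorem pvXp_set (ind : List Int) (env : List (Int × Int × Int)) (i : Nat) (v : Int)
    (hi : i < ind.length) (m k : Nat) :
    pvXp (ind.set i v) env m k
      = pvXp ind env m k
        + (if i < m then (pvSgn v - pvSgn (ind.getD i 0)) * pvCnt (env.getD i (0,0,0)) k else 0) := by
  unfold pvXp
  rw [Finset.sum_congr rfl (fun j (hj : j ∈ Finset.range m) => by
        rw [getD_set' ind i j v hi] :
      ∀ j ∈ Finset.range m,
        pvSgn ((ind.set i v).getD j 0) * pvCnt (env.getD j (0,0,0)) k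
          = pvSgn (if j = i then v else ind.getD j 0) * pvCnt (env.getD j (0,0,0)) k)]
  rw [Finset.sum_congr rfl (fun j (hj : j ∈ Finset.range m) => by
        by_cases h : j = i
        · subst h
          rw [if_pos rfl, if_pos rfl]
          ring
        · rw [if_neg h, if_neg h]
          ring :
      ∀ j ∈ Finset.range m,
        pvSgn (if j = i then v else ind.getD j 0) * pvCnt (env.getD j (0,0,0)) k
          = pvSgn (ind.getD j 0) * pvCnt (env.getD j (0,0,0)) k
            + (if j = i then (pvSgn v - pvSgn (ind.getD i 0)) * pvCnt (env.getD i (0,0,0)) k else 0))]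
  rw [Finset.sum_add_distrib, Finset.sum_ite_eq' (Finset.range m) i
        (fun _ => (pvSgn v - pvSgn (ind.getD i 0)) * pvCnt (env.getD i (0,0,0)) k)]
  by_cases him : i < m
  · rw [if_pos (Finset.mem_range.mpr him), if_pos him]
  · rw [if_neg (fun hh => him (Finset.mem_range.mp hh)), if_neg him]

theorem pvDelta_of_ge (ind : List Int) (env : List (Int × Int × Int)) (i : Nat)
    (hi : env.length ≤ i) : pvDelta ind env i = 0 := by
  unfold pvDelta pvSC
  rw [Finset.Ico_eq_empty (by omega)]
  simp

theorem score_flip (ind : List Int) (env : List (Int × Int × Int)) (i : Nat)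
    (hi : i < ind.length) :
    pvScore (ind.set i (1 - ind.getD i 0)) env env.length
      = pvScore ind env env.length + pvDelta ind env i := by
  by_cases hiN : env.length ≤ i
  · rw [pvDelta_of_ge ind env i hiN]
    unfold pvScore pvZ
    rw [Finset.sum_congr rfl (fun t (ht : t ∈ Finset.range env.length) => by
      refine Finset.sum_congr rfl (fun k _ => ?_)
      rw [Finset.mem_range] at ht
      have hlt : ¬ (i < t + 1) := by omega
      rw [pvXp_set ind env i _ hi (t+1) k, if_neg hlt, add_zero] :
        ∀ t ∈ Finset.range env.length,
          (∑ k ∈ Finset.range 20, if pvXp (ind.set i (1 - ind.getD i 0)) env (t+1) k = 0 then (1:Int) else 0)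
            = ∑ k ∈ Finset.range 20, if pvXp ind env (t+1) k = 0 then (1:Int) else 0)]
    ring
  · -- both scores split at i; the common prefix cancels, the suffix difference is pvDelta
    unfold pvScore
    rw [Finset.range_eq_Ico,
        ← Finset.sum_Ico_consecutive _ (by omega : 0 ≤ i) (by omega : i ≤ env.length),
        ← Finset.sum_Ico_consecutive _ (by omega : 0 ≤ i) (by omega : i ≤ env.length)]
    have hpref : ∑ t ∈ Finset.Ico 0 i, pvZ (ind.set i (1 - ind.getD i 0)) env (t+1)
        = ∑ t ∈ Finset.Ico 0 i, pvZ ind env (t+1) := by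
      refine Finset.sum_congr rfl (fun t ht => ?_)
      rw [Finset.mem_Ico] at ht
      unfold pvZ
      refine Finset.sum_congr rfl (fun k _ => ?_)
      have hlt : ¬ (i < t + 1) := by omega
      rw [pvXp_set ind env i _ hi (t+1) k, if_neg hlt, add_zero]
    rw [hpref]
    have hsuf : ∑ t ∈ Finset.Ico i env.length, pvZ (ind.set i (1 - ind.getD i 0)) env (t+1)
        = ∑ t ∈ Finset.Ico i env.length,
            ∑ k ∈ Finset.range 20, (if pvXp ind env (t+1) k = -(pvDif ind env i k) then (1:Int) else 0) := by
      refine Finset.sum_congr rfl (fun t ht => ?_)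
      rw [Finset.mem_Ico] at ht
      unfold pvZ
      refine Finset.sum_congr rfl (fun k _ => ?_)
      have hlt : i < t + 1 := by omega
      rw [pvXp_set ind env i _ hi (t+1) k, if_pos hlt]
      have : pvXp ind env (t+1) k + (pvSgn (1 - ind.getD i 0) - pvSgn (ind.getD i 0)) * pvCnt (env.getD i (0,0,0)) k = 0
          ↔ pvXp ind env (t+1) k = -(pvDif ind env i k) := by
        unfold pvDif
        constructor <;> intro h <;> omega
      by_cases hcond : pvXp ind env (t+1) k = -(pvDif ind env i k)
      · rw [if_pos (this.mpr hcond), if_pos hcond]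
      · rw [if_neg (fun hh => hcond (this.mp hh)), if_neg hcond]
    rw [hsuf]
    have hdelta : pvDelta ind env i
        = ∑ t ∈ Finset.Ico i env.length,
            (∑ k ∈ Finset.range 20, (if pvXp ind env (t+1) k = -(pvDif ind env i k) then (1:Int) else 0))
          - ∑ t ∈ Finset.Ico i env.length, pvZ ind env (t+1) := by
      unfold pvDelta
      rw [Finset.sum_congr rfl (fun k _ => by
            by_cases hD : pvDif ind env i k ≠ 0
            · rw [if_pos hD]
            · rw [if_neg hD, of_not_not hD, neg_zero, sub_self] :
          ∀ k ∈ Finset.range 20,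
            (if pvDif ind env i k ≠ 0
              then pvSC ind env i k (-(pvDif ind env i k)) - pvSC ind env i k 0 else 0)
              = pvSC ind env i k (-(pvDif ind env i k)) - pvSC ind env i k 0)]
      unfold pvSC pvZ
      rw [Finset.sum_sub_distrib]
      congr 1
      · exact Finset.sum_comm
      · exact Finset.sum_comm
    linarith [hdelta]

-- ---------- B's states ----------
def B_step (ind : List Int) (env : List (Int × Int × Int)) :
    (List Int × List (List Int)) → Int → (List Int × List (List Int)) :=
  fun (st : List Int × List (List Int)) t =>
    let s : Int := if PySem.List.pyGetD ind t 0 == 1 then 1 else -1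
    let e := PySem.List.pyGetD env t ((0:Int), (0:Int), (0:Int))
    let X := st.1
    let X1 := PySem.List.pySetD X e.1 (PySem.List.pyGetD X e.1 0 + s)
    let X2 := PySem.List.pySetD X1 e.2.1 (PySem.List.pyGetD X1 e.2.1 0 + s)
    let X3 := PySem.List.pySetD X2 e.2.2 (PySem.List.pyGetD X2 e.2.2 0 + s)
    (X3, st.2 ++ [X3])

theorem bStates_def (ind : List Int) (env : List (Int × Int × Int)) :
    bStates ind env
      = ((PySem.List.pyRange 0 (PySem.List.len env) 1).foldl (B_step ind env)
          ((List.replicate 20 (0:Int)), ([] : List (List Int)))).2 := rfl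

theorem B_step'_def (ind : List Int) (env : List (Int × Int × Int)) :
    B_step ind env = fun (st : List Int × List (List Int)) t =>
      let X3 := pvBump st.1 (PySem.List.pyGetD env t ((0:Int), (0:Int), (0:Int)))
                  (pvSgn (PySem.List.pyGetD ind t 0))
      (X3, st.2 ++ [X3]) := rfl

theorem Bfold (ind : List Int) (env : List (Int × Int × Int))
    (henv : ∀ e ∈ env, pvInE e) (m : Nat) (hm : m ≤ env.length) :
    (PySem.List.pyRange 0 (m : Int) 1).foldl (B_step ind env)
        ((List.replicate 20 (0:Int)), ([] : List (List Int)))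
      = (pvXL ind env m, (List.range m).map (fun t => pvXL ind env (t+1))) := by
  induction m with
  | zero =>
    rw [PySem.List.pyRange_one_eq_nil (by omega)]
    simp [pvXL, pvXp, List.map_const']
  | succ m ih =>
    rw [show ((m + 1 : Nat) : Int) = (m : Int) + 1 by push_cast; ring,
        PySem.List.pyRange_one_succ_right (by omega : (0:Int) ≤ (m : Int)),
        List.foldl_append, ih (by omega), List.foldl_cons, List.foldl_nil,
        B_step'_def]
    have hmem : env.getD m (0,0,0) ∈ env := by
      rw [pvGetD_eq env m (0,0,0) (by omega)]
      exact List.getElem_mem _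
    simp only [PySem.List.pyGetD_natCast ind m 0, PySem.List.pyGetD_natCast env m]
    rw [← pvXL_succ ind env m (henv _ hmem)]
    rw [List.range_succ, List.map_append, List.map_cons, List.map_nil]

theorem bStates_eq (ind : List Int) (env : List (Int × Int × Int))
    (henv : ∀ e ∈ env, pvInE e) :
    bStates ind env = (List.range env.length).map (fun t => pvXL ind env (t+1)) := by
  rw [bStates_def, PySem.List.len_eq, Bfold ind env henv env.length (le_refl _)]

-- ---------- B's deltas ----------
theorem getD_set'' {α : Type} (l : List α) (i j : Nat) (v d : α) (hi : i < l.length) :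
    (l.set i v).getD j d = if j = i then v else l.getD j d := by
  by_cases h : j = i
  · subst h
    simp [List.getD_eq_getElem?_getD, List.getElem?_set, hi]
  · have h' : i ≠ j := fun hh => h hh.symm
    simp [List.getD_eq_getElem?_getD, h']
    exact fun hh => absurd hh h

-- the inner per-cell suffix-table update loop of Source B
theorem cellFold (row : List Int) (suff : List (PySem.Dict Int Int)) (hs : suff.length = 20)
    (c : Nat) (hc : c ≤ 20) :
    ((PySem.List.pyRange 0 (c : Int) 1).foldl (fun suff cell =>
        let v := PySem.List.pyGetD row cell 0
        let dct := PySem.List.pyGetD suff cell PySem.Dict.empty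
        PySem.List.pySetD suff cell (dct.insert v (dct.getD v 0 + 1))) suff).length = 20
    ∧ ∀ k, k < 20 →
      ((PySem.List.pyRange 0 (c : Int) 1).foldl (fun suff cell =>
        let v := PySem.List.pyGetD row cell 0
        let dct := PySem.List.pyGetD suff cell PySem.Dict.empty
        PySem.List.pySetD suff cell (dct.insert v (dct.getD v 0 + 1))) suff).getD k PySem.Dict.empty
      = if k < c
          then (suff.getD k PySem.Dict.empty).insert (row.getD k 0)
                 ((suff.getD k PySem.Dict.empty).getD (row.getD k 0) 0 + 1)
          else suff.getD k PySem.Dict.empty := by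
  induction c with
  | zero =>
    rw [PySem.List.pyRange_one_eq_nil (by omega)]
    exact ⟨hs, fun k hk => by rw [if_neg (by omega)]; rfl⟩
  | succ c ih =>
    obtain ⟨ihl, ihg⟩ := ih (by omega)
    rw [show ((c + 1 : Nat) : Int) = (c : Int) + 1 by push_cast; ring,
        PySem.List.pyRange_one_succ_right (by omega : (0:Int) ≤ (c : Int)),
        List.foldl_append, List.foldl_cons, List.foldl_nil]
    simp only [PySem.List.pyGetD_natCast, PySem.List.pySetD_natCast]
    constructor
    · rw [List.length_set, ihl]
    · intro k hk
      rw [getD_set'' _ c k _ _ (by rw [ihl]; omega)]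
      by_cases hkc : k = c
      · subst hkc
        rw [if_pos rfl, if_pos (by omega), ihg k hk, if_neg (by omega)]
      · rw [if_neg hkc, ihg k hk]
        by_cases hlt : k < c
        · rw [if_pos hlt, if_pos (by omega)]
        · rw [if_neg hlt, if_neg (by omega)]

-- the per-flip delta accumulation loop of Source B
theorem deltaFold (d : List Int) (suff : List (PySem.Dict Int Int)) (c : Nat) (a : Int) :
    (PySem.List.pyRange 0 (c : Int) 1).foldl (fun delta cell =>
        if PySem.List.pyGetD d cell 0 ≠ 0 then
          delta + ((PySem.List.pyGetD suff cell PySem.Dict.empty).getD (-(PySem.List.pyGetD d cell 0)) 0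
                   - (PySem.List.pyGetD suff cell PySem.Dict.empty).getD 0 0)
        else delta) a
    = a + ∑ k ∈ Finset.range c,
        (if d.getD k 0 ≠ 0
          then ((suff.getD k PySem.Dict.empty).getD (-(d.getD k 0)) 0
                - (suff.getD k PySem.Dict.empty).getD 0 0)
          else 0) := by
  induction c with
  | zero =>
    rw [PySem.List.pyRange_one_eq_nil (by omega)]
    simp
  | succ c ih =>
    rw [show ((c + 1 : Nat) : Int) = (c : Int) + 1 by push_cast; ring,
        PySem.List.pyRange_one_succ_right (by omega : (0:Int) ≤ (c : Int)),
        List.foldl_append, List.foldl_cons, List.foldl_nil, ih,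
        Finset.sum_range_succ]
    simp only [PySem.List.pyGetD_natCast]
    by_cases hd : d.getD c 0 ≠ 0
    · rw [if_pos hd, if_pos hd]
      ring
    · rw [if_neg hd, if_neg hd]
      ring

theorem deltaFold20 (d : List Int) (suff : List (PySem.Dict Int Int)) (a : Int) :
    (PySem.List.pyRange 0 (20:Int) 1).foldl (fun delta cell =>
        if PySem.List.pyGetD d cell 0 ≠ 0 then
          delta + ((PySem.List.pyGetD suff cell PySem.Dict.empty).getD (-(PySem.List.pyGetD d cell 0)) 0
                   - (PySem.List.pyGetD suff cell PySem.Dict.empty).getD 0 0)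
        else delta) a
    = a + ∑ k ∈ Finset.range 20,
        (if d.getD k 0 ≠ 0
          then ((suff.getD k PySem.Dict.empty).getD (-(d.getD k 0)) 0
                - (suff.getD k PySem.Dict.empty).getD 0 0)
          else 0) := by
  simpa using deltaFold d suff 20 a

theorem pvSC_succ (ind : List Int) (env : List (Int × Int × Int)) (i k : Nat) (v : Int)
    (hi : i < env.length) :
    pvSC ind env i k v
      = (if pvXp ind env (i+1) k = v then (1:Int) else 0) + pvSC ind env (i+1) k v := by
  unfold pvSC
  rw [Finset.sum_eq_sum_Ico_succ_bot (by omega : i < env.length)]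

def D_step (ind : List Int) (env : List (Int × Int × Int)) (states : List (List Int)) :
    (List (PySem.Dict Int Int) × List Int) → Int → (List (PySem.Dict Int Int) × List Int) :=
  fun (st : List (PySem.Dict Int Int) × List Int) i =>
    let suff := (PySem.List.pyRange 0 20 1).foldl (fun suff cell =>
      let v := PySem.List.pyGetD (PySem.List.pyGetD states i []) cell 0
      let dct := PySem.List.pyGetD suff cell PySem.Dict.empty
      PySem.List.pySetD suff cell (dct.insert v (dct.getD v 0 + 1))) st.1
    let old : Int := if PySem.List.pyGetD ind i 0 == 1 then 1 else -1
    let nw : Int := if 1 - PySem.List.pyGetD ind i 0 == 1 then 1 else -1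
    let e := PySem.List.pyGetD env i ((0:Int), (0:Int), (0:Int))
    let d0 := List.replicate 20 (0:Int)
    let d1 := PySem.List.pySetD d0 e.1 (PySem.List.pyGetD d0 e.1 0 + (nw - old))
    let d2 := PySem.List.pySetD d1 e.2.1 (PySem.List.pyGetD d1 e.2.1 0 + (nw - old))
    let d := PySem.List.pySetD d2 e.2.2 (PySem.List.pyGetD d2 e.2.2 0 + (nw - old))
    let delta := (PySem.List.pyRange 0 20 1).foldl (fun delta cell =>
      if PySem.List.pyGetD d cell 0 ≠ 0 then
        delta + ((PySem.List.pyGetD suff cell PySem.Dict.empty).getD (-(PySem.List.pyGetD d cell 0)) 0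
                 - (PySem.List.pyGetD suff cell PySem.Dict.empty).getD 0 0)
      else delta) 0
    (suff, PySem.List.pySetD st.2 i delta)

theorem bDeltas_def (ind : List Int) (env : List (Int × Int × Int)) (states : List (List Int)) :
    bDeltas ind env states
      = ((PySem.List.pyRange (PySem.List.len env - 1) (-1) (-1)).foldl (D_step ind env states)
          ((List.replicate 20 (PySem.Dict.empty : PySem.Dict Int Int)),
           List.replicate (PySem.List.len env).toNat (0:Int))).2 := rfl

-- D_step with the d-array recognised as pvBump and the branch values as pvSgn
theorem D_step'_def (ind : List Int) (env : List (Int × Int × Int)) (states : List (List Int)) :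
    D_step ind env states = fun (st : List (PySem.Dict Int Int) × List Int) i =>
      let suff := (PySem.List.pyRange 0 20 1).foldl (fun suff cell =>
        let v := PySem.List.pyGetD (PySem.List.pyGetD states i []) cell 0
        let dct := PySem.List.pyGetD suff cell PySem.Dict.empty
        PySem.List.pySetD suff cell (dct.insert v (dct.getD v 0 + 1))) st.1
      let d := pvBump (List.replicate 20 (0:Int)) (PySem.List.pyGetD env i ((0:Int), (0:Int), (0:Int)))
                 (pvSgn (1 - PySem.List.pyGetD ind i 0) - pvSgn (PySem.List.pyGetD ind i 0))
      let delta := (PySem.List.pyRange 0 20 1).foldl (fun delta cell =>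
        if PySem.List.pyGetD d cell 0 ≠ 0 then
          delta + ((PySem.List.pyGetD suff cell PySem.Dict.empty).getD (-(PySem.List.pyGetD d cell 0)) 0
                   - (PySem.List.pyGetD suff cell PySem.Dict.empty).getD 0 0)
        else delta) 0
      (suff, PySem.List.pySetD st.2 i delta) := rfl

set_option maxRecDepth 16384 in
set_option maxHeartbeats 2000000 in
theorem D_step_eq (ind : List Int) (env : List (Int × Int × Int)) (states : List (List Int))
    (hstates : states = (List.range env.length).map (fun t => pvXL ind env (t+1)))
    (i : Nat) (hiN : i < env.length) (he : pvInE (env.getD i (0,0,0)))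
    (st : List (PySem.Dict Int Int) × List Int)
    (h1 : st.1.length = 20)
    (h2 : ∀ k, k < 20 → ∀ w, (st.1.getD k PySem.Dict.empty).getD w 0 = pvSC ind env (i+1) k w) :
    (D_step ind env states st (i : Int)).1.length = 20
    ∧ (∀ k, k < 20 → ∀ w,
        ((D_step ind env states st (i : Int)).1.getD k PySem.Dict.empty).getD w 0 = pvSC ind env i k w)
    ∧ (D_step ind env states st (i : Int)).2 = st.2.set i (pvDelta ind env i) := by
  have hrow : PySem.List.pyGetD states (i : Int) [] = pvXL ind env (i+1) := by
    rw [PySem.List.pyGetD_natCast, hstates,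
        pvGetD_eq _ i [] (by simp; omega)]
    simp
  have hrowD : ∀ k, k < 20 → (PySem.List.pyGetD states (i : Int) []).getD k 0 = pvXp ind env (i+1) k := by
    intro k hk
    rw [hrow, pvXL_getD ind env (i+1) k hk]
  rw [D_step'_def]
  simp only []
  have h20 : ((20:Nat) : Int) = (20 : Int) := by norm_num
  obtain ⟨cfl, cfg⟩ := cellFold (PySem.List.pyGetD states (i : Int) []) st.1 h1 20 (by omega)
  rw [h20] at cfl cfg
  have hsuff : ∀ k, k < 20 → ∀ w,
      (((PySem.List.pyRange 0 20 1).foldl (fun suff cell =>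
          let v := PySem.List.pyGetD (PySem.List.pyGetD states (i:Int) []) cell 0
          let dct := PySem.List.pyGetD suff cell PySem.Dict.empty
          PySem.List.pySetD suff cell (dct.insert v (dct.getD v 0 + 1))) st.1).getD k PySem.Dict.empty).getD w 0
        = pvSC ind env i k w := by
    intro k hk w
    rw [cfg k hk, if_pos hk, PySem.Dict.getD_insert, hrowD k hk,
        pvSC_succ ind env i k w hiN]
    by_cases hw : w = pvXp ind env (i+1) k
    · rw [if_pos hw, h2 k hk, if_pos hw.symm, hw]
      ring
    · rw [if_neg hw, h2 k hk, if_neg (fun hh => hw hh.symm)]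
      ring
  refine ⟨cfl, hsuff, ?_⟩
  -- the deltas component
  have hdD : ∀ k, k < 20 →
      (pvBump (List.replicate 20 (0:Int)) (PySem.List.pyGetD env (i:Int) ((0:Int),(0:Int),(0:Int)))
        (pvSgn (1 - PySem.List.pyGetD ind (i:Int) 0) - pvSgn (PySem.List.pyGetD ind (i:Int) 0))).getD k 0
      = pvDif ind env i k := by
    intro k hk
    rw [PySem.List.pyGetD_natCast env i, PySem.List.pyGetD_natCast ind i,
        pvBump_getD _ _ _ (by simp) he k hk,
        show (List.replicate 20 (0:Int)).getD k 0 = 0 by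
          rw [pvGetD_eq _ k 0 (by simp; omega), List.getElem_replicate]]
    unfold pvDif
    ring
  rw [PySem.List.pySetD_natCast]
  refine congrArg (st.2.set i) ?_
  rw [deltaFold20, zero_add]
  unfold pvDelta
  refine Finset.sum_congr rfl (fun k hk => ?_)
  rw [Finset.mem_range] at hk
  rw [hdD k hk]
  by_cases hD : pvDif ind env i k ≠ 0
  · rw [if_pos hD, if_pos hD, hsuff k hk, hsuff k hk]
  · rw [if_neg hD, if_neg hD]

-- downward induction over Source B's backwards loop
theorem Dfold (ind : List Int) (env : List (Int × Int × Int)) (states : List (List Int))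
    (hstates : states = (List.range env.length).map (fun t => pvXL ind env (t+1)))
    (henv : ∀ e ∈ env, pvInE e) (c : Nat) (hc : c ≤ env.length) :
    ((PySem.List.pyRange ((env.length - c : Nat) : Int) (env.length : Int) 1).foldr
        (fun x acc => D_step ind env states acc x)
        ((List.replicate 20 (PySem.Dict.empty : PySem.Dict Int Int)),
         List.replicate env.length (0:Int))).1.length = 20
    ∧ (∀ k, k < 20 → ∀ w,
        ((((PySem.List.pyRange ((env.length - c : Nat) : Int) (env.length : Int) 1).foldr
        (fun x acc => D_step ind env states acc x)
        ((List.replicate 20 (PySem.Dict.empty : PySem.Dict Int Int)),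
         List.replicate env.length (0:Int))).1.getD k PySem.Dict.empty).getD w 0)
          = pvSC ind env (env.length - c) k w)
    ∧ ((PySem.List.pyRange ((env.length - c : Nat) : Int) (env.length : Int) 1).foldr
        (fun x acc => D_step ind env states acc x)
        ((List.replicate 20 (PySem.Dict.empty : PySem.Dict Int Int)),
         List.replicate env.length (0:Int))).2.length = env.length
    ∧ (∀ j, env.length - c ≤ j → j < env.length →
        ((PySem.List.pyRange ((env.length - c : Nat) : Int) (env.length : Int) 1).foldr
        (fun x acc => D_step ind env states acc x)
        ((List.replicate 20 (PySem.Dict.empty : PySem.Dict Int Int)),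
         List.replicate env.length (0:Int))).2.getD j 0 = pvDelta ind env j) := by
  induction c with
  | zero =>
    rw [PySem.List.pyRange_one_eq_nil (by omega)]
    simp only [List.foldr_nil]
    refine ⟨by simp, fun k hk w => ?_, by simp, fun j hj1 hj2 => by omega⟩
    rw [pvGetD_eq _ k PySem.Dict.empty (by simp; omega), List.getElem_replicate,
        PySem.Dict.getD_empty]
    unfold pvSC
    rw [Nat.sub_zero, Finset.Ico_self, Finset.sum_empty]
  | succ c ih =>
    have hc' : c ≤ env.length := by omega
    obtain ⟨ih1, ih2, ih3, ih4⟩ := ih hc'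
    have hi : env.length - (c + 1) < env.length := by omega
    have hstep : ((env.length - (c+1) : Nat) : Int) < ((env.length : Nat) : Int) := by
      push_cast; omega
    rw [PySem.List.pyRange_one_cons hstep,
        show ((env.length - (c+1) : Nat) : Int) + 1 = ((env.length - c : Nat) : Int) by push_cast; omega]
    simp only [List.foldr_cons]
    have hmem : env.getD (env.length - (c+1)) (0,0,0) ∈ env := by
      rw [pvGetD_eq env _ (0,0,0) (by omega)]
      exact List.getElem_mem _
    have hidx : env.length - (c+1) + 1 = env.length - c := by omega
    set F := (PySem.List.pyRange ((env.length - c : Nat) : Int) (env.length : Int) 1).foldr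
        (fun x acc => D_step ind env states acc x)
        ((List.replicate 20 (PySem.Dict.empty : PySem.Dict Int Int)),
         List.replicate env.length (0:Int)) with hFdef
    rw [← hidx] at ih2
    obtain ⟨d1, d2, d3⟩ := D_step_eq ind env states hstates (env.length - (c+1)) hi
      (henv _ hmem) F ih1 ih2
    refine ⟨d1, d2, ?_, ?_⟩
    · rw [d3, List.length_set, ih3]
    · intro j hj1 hj2
      rw [d3, getD_set'' _ _ j _ _ (by rw [ih3]; omega)]
      by_cases hji : j = env.length - (c+1)
      · rw [if_pos hji, hji]
      · rw [if_neg hji]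
        exact ih4 j (by omega) hj2

theorem bDeltas_eq (ind : List Int) (env : List (Int × Int × Int))
    (henv : ∀ e ∈ env, pvInE e) (j : Nat) (hj : j < env.length) :
    (bDeltas ind env (bStates ind env)).getD j 0 = pvDelta ind env j := by
  rw [bDeltas_def, PySem.List.len_eq, PySem.List.pyRange_neg_one_eq_reverse,
      show ((-1:Int) + 1) = 0 by ring,
      show ((env.length : Int) - 1 + 1) = (env.length : Int) by ring,
      List.foldl_reverse]
  simp only [Int.toNat_natCast]
  have h := Dfold ind env (bStates ind env) (bStates_eq ind env henv) henv env.length (le_refl _)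
  rw [Nat.sub_self, Nat.cast_zero] at h
  obtain ⟨_, _, _, h4⟩ := h
  exact h4 j (by omega) hj

-- ---------- the two selection loops ----------
theorem pyGetD_toNat (xs : List Int) (i : Int) (h : 0 ≤ i) :
    PySem.List.pyGetD xs i 0 = xs.getD i.toNat 0 := by
  unfold PySem.List.pyGetD
  rw [PySem.List.pyGet?_of_nonneg xs h, List.getD_eq_getElem?_getD]

theorem predicate_eq (ind : List Int) (env : List (Int × Int × Int))
    (henv : ∀ e ∈ env, pvInE e) (i : Int) (h0 : 0 ≤ i) (hlt : i < (ind.length : Int)) :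
    (adaptScore (PySem.List.pySetD ind i (1 - PySem.List.pyGetD ind i 0)) env > adaptScore ind env)
      ↔ (i < (env.length : Int) ∧ (bDeltas ind env (bStates ind env)).getD i.toNat 0 > 0) := by
  have hi' : i = (i.toNat : Int) := by omega
  have hnlen : i.toNat < ind.length := by omega
  rw [hi', PySem.List.pySetD_natCast, PySem.List.pyGetD_natCast, Int.toNat_natCast,
      adaptScore_eq _ env henv, adaptScore_eq ind env henv,
      score_flip ind env i.toNat hnlen]
  by_cases hN : i.toNat < env.length
  · rw [bDeltas_eq ind env henv i.toNat hN]
    constructor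
    · intro h
      exact ⟨by exact_mod_cast hN, by linarith⟩
    · rintro ⟨_, h2⟩
      linarith
  · rw [pvDelta_of_ge ind env i.toNat (by omega)]
    constructor
    · intro h
      linarith
    · rintro ⟨h1, _⟩
      exfalso
      have : i.toNat < env.length := by exact_mod_cast h1
      omega

theorem loops_eq (ind : List Int) (env : List (Int × Int × Int))
    (henv : ∀ e ∈ env, pvInE e) (l : List Int)
    (hl : ∀ i ∈ l, 0 ≤ i ∧ i < (ind.length : Int)) :
    climbLoopA env (adaptScore ind env) ind l
      = pickLoopB (PySem.List.len env) (bDeltas ind env (bStates ind env)) ind l := by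
  induction l with
  | nil => rfl
  | cons i rest ih =>
    obtain ⟨h0, hlt⟩ := hl i List.mem_cons_self
    rw [climbLoopA, pickLoopB]
    by_cases hc : adaptScore (PySem.List.pySetD ind i (1 - PySem.List.pyGetD ind i 0)) env
        > adaptScore ind env
    · rw [if_pos hc, if_pos (by
        rw [PySem.List.len_eq]
        obtain ⟨hA, hB⟩ := (predicate_eq ind env henv i h0 hlt).mp hc
        exact ⟨hA, by rw [pyGetD_toNat _ i h0]; exact hB⟩)]
    · rw [if_neg hc, if_neg (by
        rw [PySem.List.len_eq]
        intro ⟨hA, hB⟩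
        exact hc ((predicate_eq ind env henv i h0 hlt).mpr
          ⟨hA, by rw [pyGetD_toNat _ i h0] at hB; exact hB⟩))]
      exact ih (fun j hj => hl j (List.mem_cons_of_mem _ hj))

theorem main_eq (ind : List Int) (env : List (Int × Int × Int))
    (hpre : Pre_climbing ind env) :
    climbing ind env = climbing_alt ind env := by
  have henv : ∀ e ∈ env, pvInE e := hpre.2
  show climbLoopA env (adaptScore ind env) ind (PySem.List.pyRange 0 (PySem.List.len ind) 1)
    = pickLoopB (PySem.List.len env) (bDeltas ind env (bStates ind env)) ind
        (PySem.List.pyRange 0 (PySem.List.len ind) 1)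
  exact loops_eq ind env henv _ (fun j hj => by
    rw [PySem.List.len_eq] at hj
    exact PySem.List.mem_pyRange_one.mp hj)

-- ===== VERDICT (by name: the statement is the Claim_ definition above) =====
theorem climbing_spec : Claim_equal_climbing := by
  intro ind env _ hpre
  exact main_eq ind env hpre
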